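-- pv_equiv track=rewrite | github.com/eshapriyanka/NutriGenie | app1.py | clean_recipe_text
-- ===== SOURCE A (Python) =====
-- def clean_recipe_text(text):
--     # Cut off at serving suggestions to avoid hallucinations
--     cutoff_phrases = [
--         "Serve with", "Serve hot", "Serve the", "Serve it",
--         "Enjoy with", "Best served", "Pair with", "Garnish with"
--     ]
--     for phrase in cutoff_phrases:
--         if phrase in text:
--             text = text.split(phrase)[0]
--     return text.strip().strip(",").strip("-")
-- ===== SOURCE B (Python) =====
-- def clean_recipe_text(text):
--     # Cut off at serving suggestions to avoid hallucinations
--     cutoff_phrases = [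
--         "Serve with", "Serve hot", "Serve the", "Serve it",
--         "Enjoy with", "Best served", "Pair with", "Garnish with"
--     ]
--     # One-shot truncation: find the earliest cutoff occurrence, cut once.
--     positions = [text.find(p) for p in cutoff_phrases if p in text]
--     if positions:
--         text = text[:min(positions)]
--     return text.strip().strip(",").strip("-")
-- ===== Notes on version B (the rewrite author's own statement) =====
-- stated objective: simpler
-- what changed: Replaces the order-dependent loop that repeatedly splits and reassigns the text with a one-shot decomposition: collect the first-occurrence index of each phrase present, truncate once at the minimum, then apply the same strip chain.
import Mathlib
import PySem

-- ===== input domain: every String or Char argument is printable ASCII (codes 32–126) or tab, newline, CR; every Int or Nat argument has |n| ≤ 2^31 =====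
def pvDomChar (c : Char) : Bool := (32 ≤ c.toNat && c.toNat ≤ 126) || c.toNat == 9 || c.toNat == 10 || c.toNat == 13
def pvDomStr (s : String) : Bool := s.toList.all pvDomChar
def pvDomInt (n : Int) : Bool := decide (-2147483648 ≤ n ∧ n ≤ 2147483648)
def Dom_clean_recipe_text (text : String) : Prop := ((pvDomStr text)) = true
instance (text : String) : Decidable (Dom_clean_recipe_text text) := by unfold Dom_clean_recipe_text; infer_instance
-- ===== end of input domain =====

-- B replaces A's order-dependent repeated split-and-reassign loop by a one-shot
-- truncation at the earliest phrase occurrence (simpler decomposition, same values).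

-- ===== PORT A =====
def pvPhrases : List String :=
  ["Serve with", "Serve hot", "Serve the", "Serve it",
   "Enjoy with", "Best served", "Pair with", "Garnish with"]

def clean_recipe_text (text : String) : String :=
  -- for phrase in cutoff_phrases: if phrase in text: text = text.split(phrase)[0]
  let t := pvPhrases.foldl (fun t phrase =>
    if PySem.Str.isIn phrase t then
      -- text.split(phrase)[0]: split always returns a nonempty list, so [0] is its head
      String.ofList ((PySem.Chars.splitOn t.toList phrase.toList).headD [])
    else t) text
  -- return text.strip().strip(",").strip("-")
  PySem.Str.stripChars (PySem.Str.stripChars (PySem.Str.strip t) ",") "-"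

-- ===== PORT B =====
def clean_recipe_text_alt (text : String) : String :=
  -- positions = [text.find(p) for p in cutoff_phrases if p in text]
  let positions := (pvPhrases.filter (fun p => PySem.Str.isIn p text)).map
    (fun p => PySem.Str.find text p)
  -- if positions: text = text[:min(positions)]
  let t := match PySem.List.min? positions (fun x => x) with
    | none => text
    | some m => PySem.Str.slice text none (some m)
  PySem.Str.stripChars (PySem.Str.stripChars (PySem.Str.strip t) ",") "-"

-- ===== PRECONDITION & SPEC =====
def Spec_clean_recipe_text (text : String) (out : String) : Prop := out = clean_recipe_text_alt text
instance (text : String) (out : String) : Decidable (Spec_clean_recipe_text text out) := by unfold Spec_clean_recipe_text; infer_instance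

-- ===== CLAIM (what is proved, stated in full; the proofs are below) =====
def Claim_equal_clean_recipe_text : Prop := ∀ (text : String), Dom_clean_recipe_text text → Spec_clean_recipe_text text (clean_recipe_text text)

-- ===== LEMMAS AND PROOFS =====

-- The phrase list on the character level.
def pvPL : List (List Char) := pvPhrases.map String.toList

-- A's loop body on the character level.
def pvStepA (t p : List Char) : List Char :=
  if PySem.Chars.isIn p t then (PySem.Chars.splitOn t p).headD [] else t

-- Optional minimum accumulator.
def pvOmin : Option Nat → Nat → Option Nat
  | none, f => some f
  | some a, f => some (min a f)

-- The running minimum cut position over a phrase list.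
def pvFoldMin (cs : List Char) (L : List (List Char)) (m : Option Nat) : Option Nat :=
  L.foldl (fun acc p =>
    if PySem.Chars.isIn p cs then pvOmin acc (PySem.Chars.find cs p).toNat else acc) m

-- Truncation at an optional position.
def pvTrunc (cs : List Char) : Option Nat → List Char
  | none => cs
  | some k => cs.take k

-- f is THE first occurrence of p in cs.
def pvOcc (cs p : List Char) (f : Nat) : Prop :=
  p <+: cs.drop f ∧ ∀ i < f, ¬ p <+: cs.drop i

-- Invariant: the current cut position is the first occurrence of some phrase.
def pvInv (cs : List Char) : Option Nat → Prop
  | none => True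
  | some g => ∃ q ∈ pvPL, pvOcc cs q g

lemma pvPL_ne : ∀ p ∈ pvPL, p ≠ [] := by decide

-- No phrase's first character occurs at a positive position inside any phrase.
lemma pvPL_good : ∀ p ∈ pvPL, ∀ q ∈ pvPL, ∀ i, ∀ (h : i < p.length), 0 < i → q.headD ' ' ≠ p[i] := by
  decide

-- splitOn.go prepends acc.reverse to its result.
lemma pvGo_acc (sep : List Char) : ∀ (fuel : Nat) (l cur : List Char) (acc : List (List Char)),
    PySem.Chars.splitOn.go sep fuel l cur acc
      = acc.reverse ++ PySem.Chars.splitOn.go sep fuel l cur [] := by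
  intro fuel
  induction fuel with
  | zero => intro l cur acc; simp [PySem.Chars.splitOn.go]
  | succ n ih =>
    intro l cur acc
    cases l with
    | nil => simp [PySem.Chars.splitOn.go]
    | cons c rest =>
      rw [PySem.Chars.splitOn.go, PySem.Chars.splitOn.go]
      by_cases h : sep.isPrefixOf (c :: rest)
      · simp only [h, if_true]
        rw [ih _ _ (_ :: acc), ih _ _ [_]]
        simp
      · simp only [h]
        exact ih _ _ acc

-- The head of splitOn.go tracks the first occurrence of the separator.
lemma pvGo_head (sep : List Char) (hsep : sep ≠ []) : ∀ (fuel : Nat) (l cur : List Char) (f : Nat),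
    l.length < fuel → sep <+: l.drop f → (∀ i < f, ¬ sep <+: l.drop i) →
    (PySem.Chars.splitOn.go sep fuel l cur []).head? = some (cur.reverse ++ l.take f) := by
  intro fuel
  induction fuel with
  | zero => intro l cur f h _ _; exact absurd h (by omega)
  | succ n ih =>
    intro l cur f hlen hocc hmin
    cases l with
    | nil =>
      exfalso
      have : sep <+: ([] : List Char) := by simpa using hocc
      exact hsep (List.prefix_nil.mp this)
    | cons c rest =>
      rw [PySem.Chars.splitOn.go]
      by_cases h : sep.isPrefixOf (c :: rest)
      · simp only [h, if_true]
        have hf0 : f = 0 := by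
          by_contra hne
          exact hmin 0 (by omega) (by simpa using List.isPrefixOf_iff_prefix.mp h)
        subst hf0
        rw [pvGo_acc]
        simp
      · rw [if_neg (by simp [h])]
        obtain ⟨k, rfl⟩ : ∃ k, f = k + 1 := by
          refine ⟨f - 1, ?_⟩
          rcases Nat.eq_zero_or_pos f with h0 | h0
          · subst h0
            exact absurd (List.isPrefixOf_iff_prefix.mpr (by simpa using hocc)) h
          · omega
        have := ih rest (c :: cur) k (by simpa using Nat.lt_of_succ_lt_succ (by simpa using hlen))
          (by simpa using hocc)
          (fun i hi => by
            have := hmin (i+1) (by omega)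
            simpa using this)
        rw [this]
        simp [List.take_succ_cons]

lemma pvSplitOn_head (cs sep : List Char) (hsep : sep ≠ []) (f : Nat)
    (h1 : sep <+: cs.drop f) (h2 : ∀ i < f, ¬ sep <+: cs.drop i) :
    (PySem.Chars.splitOn cs sep).headD [] = cs.take f := by
  have h := pvGo_head sep hsep (cs.length + 1) cs [] f (by omega) h1 h2
  unfold PySem.Chars.splitOn
  rw [List.headD_eq_head?_getD, h]
  simp

-- First occurrences of two phrases: if p starts strictly earlier, it ends no later
-- than q starts (no phrase head occurs inside another phrase).
lemma pvOverlap (cs p q : List Char) (f g : Nat) (hp : p ∈ pvPL) (hq : q ∈ pvPL)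
    (hof : pvOcc cs p f) (hog : pvOcc cs q g) (h : f < g) : f + p.length ≤ g := by
  by_contra hlt
  rw [not_le] at hlt
  obtain ⟨t1, ht1⟩ := hof.1
  obtain ⟨t2, ht2⟩ := hog.1
  have hqne : q ≠ [] := pvPL_ne q hq
  have hglen : g < cs.length := by
    by_contra hge
    rw [not_lt] at hge
    rw [List.drop_eq_nil_of_le hge] at ht2
    exact hqne (List.append_eq_nil_iff.mp ht2).1
  have hidx : g - f < p.length := by omega
  have e1 : cs[g]? = p[g - f]? := by
    have hgf : cs[g]? = cs[f + (g - f)]? := by congr 1; omega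
    rw [hgf, ← List.getElem?_drop, ← ht1, List.getElem?_append_left (by omega)]
  have e2 : cs[g]? = q[0]? := by
    have hg0 : cs[g]? = cs[g + 0]? := by congr 1
    rw [hg0, ← List.getElem?_drop, ← ht2,
      List.getElem?_append_left (by cases q with | nil => exact absurd rfl hqne | cons a b => simp)]
  have hq0 : q[0]? = some (q.headD ' ') := by
    cases q with
    | nil => exact absurd rfl hqne
    | cons q0 qr => simp
  have hpgf : p[g - f]? = some (p[g - f]'hidx) := List.getElem?_eq_getElem hidx
  refine pvPL_good p hp q hq (g - f) hidx (by omega) ?_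
  have he : some (q.headD ' ') = some (p[g - f]'hidx) := by rw [← hq0, ← e2, e1, hpgf]
  exact Option.some.inj he

-- Prefixes at earlier positions survive truncation.
lemma pvPrefixDropTake (cs p : List Char) (f g : Nat)
    (hpre : p <+: cs.drop f) (hfit : f + p.length ≤ g) : p <+: (cs.take g).drop f := by
  rw [List.drop_take]
  exact List.prefix_take_iff.mpr ⟨hpre, by omega⟩

lemma pvNotPrefixDrop (cs p : List Char) (i g : Nat)
    (hnp : ¬ p <+: cs.drop i) : ¬ p <+: (cs.take g).drop i := by
  intro hcon
  rw [List.drop_take] at hcon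
  exact hnp (hcon.trans (List.take_prefix _ _))

-- One loop step of A on a truncated text is a truncation at the updated minimum.
lemma pvStepA_eq (cs p : List Char) (hp : p ∈ pvPL) (m : Option Nat) (hm : pvInv cs m) :
    pvStepA (pvTrunc cs m) p
      = pvTrunc cs (if PySem.Chars.isIn p cs then pvOmin m (PySem.Chars.find cs p).toNat else m)
    ∧ pvInv cs (if PySem.Chars.isIn p cs then pvOmin m (PySem.Chars.find cs p).toNat else m) := by
  have hpne := pvPL_ne p hp
  cases m with
  | none =>
    by_cases hin : PySem.Chars.isIn p cs = true
    · have hnn : 0 ≤ PySem.Chars.find cs p :=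
        (PySem.Chars.find_nonneg_iff cs p).mpr ((PySem.Chars.isIn_iff_infix p cs).mp hin)
      have hspec := PySem.Chars.find_spec hnn
      refine ⟨?_, ?_⟩
      · simp only [pvStepA, pvTrunc, hin, if_true, pvOmin]
        exact pvSplitOn_head cs p hpne _ hspec.1 hspec.2
      · simp only [hin, if_true, pvOmin, pvInv]
        exact ⟨p, hp, hspec.1, hspec.2⟩
    · refine ⟨?_, ?_⟩
      · simp [pvStepA, pvTrunc, hin]
      · simp [hin, pvInv]
  | some g =>
    obtain ⟨q, hq, hogq⟩ := hm
    by_cases hins : PySem.Chars.isIn p (cs.take g) = true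
    · obtain ⟨j, hj⟩ := (PySem.Chars.exists_prefix_drop_iff_isIn p (cs.take g)).mpr hins
      rw [List.drop_take] at hj
      have hj' := List.prefix_take_iff.mp hj
      have hplen : 0 < p.length := List.length_pos_iff.mpr hpne
      have hjg : j + p.length ≤ g := by
        have := hj'.2
        omega
      have hin : PySem.Chars.isIn p cs = true :=
        (PySem.Chars.exists_prefix_drop_iff_isIn p cs).mp ⟨j, hj'.1⟩
      have hnn : 0 ≤ PySem.Chars.find cs p :=
        (PySem.Chars.find_nonneg_iff cs p).mpr ((PySem.Chars.isIn_iff_infix p cs).mp hin)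
      have hspec := PySem.Chars.find_spec hnn
      set f := (PySem.Chars.find cs p).toNat with hf
      have hfj : f ≤ j := by
        by_contra hlt
        exact hspec.2 j (by omega) hj'.1
      have hfit : f + p.length ≤ g := by omega
      have hoccs : p <+: (cs.take g).drop f := pvPrefixDropTake cs p f g hspec.1 hfit
      have hmins : ∀ i < f, ¬ p <+: (cs.take g).drop i :=
        fun i hi => pvNotPrefixDrop cs p i g (hspec.2 i hi)
      refine ⟨?_, ?_⟩
      · simp only [pvStepA, pvTrunc, hins, if_true, hin, pvOmin]
        rw [pvSplitOn_head (cs.take g) p hpne f hoccs hmins, List.take_take, min_comm]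
      · simp only [hin, if_true, pvOmin, pvInv]
        rcases le_total g f with hgf | hfg
        · rw [min_eq_left hgf]
          exact ⟨q, hq, hogq⟩
        · rw [min_eq_right hfg]
          exact ⟨p, hp, hspec.1, hspec.2⟩
    · by_cases hin : PySem.Chars.isIn p cs = true
      · have hnn : 0 ≤ PySem.Chars.find cs p :=
          (PySem.Chars.find_nonneg_iff cs p).mpr ((PySem.Chars.isIn_iff_infix p cs).mp hin)
        have hspec := PySem.Chars.find_spec hnn
        set f := (PySem.Chars.find cs p).toNat with hf
        have hgf : g ≤ f := by
          by_contra hlt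
          have hov := pvOverlap cs p q f g hp hq ⟨hspec.1, hspec.2⟩ hogq (by omega)
          exact hins ((PySem.Chars.exists_prefix_drop_iff_isIn p (cs.take g)).mp
            ⟨f, pvPrefixDropTake cs p f g hspec.1 hov⟩)
        refine ⟨?_, ?_⟩
        · simp [pvStepA, pvTrunc, hins, hin, pvOmin, min_eq_left hgf]
        · simp only [hin, if_true, pvOmin, pvInv, min_eq_left hgf]
          exact ⟨q, hq, hogq⟩
      · refine ⟨?_, ?_⟩
        · simp [pvStepA, pvTrunc, hins, hin]
        · simp only [hin, if_false, Bool.false_eq_true, pvInv]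
          exact ⟨q, hq, hogq⟩

-- A's whole loop is a truncation at the running minimum.
lemma pvFold_eq (cs : List Char) : ∀ (L : List (List Char)), (∀ p ∈ L, p ∈ pvPL) →
    ∀ (m : Option Nat), pvInv cs m →
    L.foldl pvStepA (pvTrunc cs m) = pvTrunc cs (pvFoldMin cs L m) := by
  intro L
  induction L with
  | nil => intro _ m _; simp [pvFoldMin]
  | cons p L ih =>
    intro hsub m hm
    have hp : p ∈ pvPL := hsub p (by simp)
    obtain ⟨h1, h2⟩ := pvStepA_eq cs p hp m hm
    simp only [List.foldl_cons, pvFoldMin] at *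
    rw [h1]
    exact ih (fun r hr => hsub r (by simp [hr])) _ h2

-- Bridge: A's String-level fold is the character-level fold.
lemma pvFoldA_toList (L : List String) : ∀ (t : String),
    (L.foldl (fun t phrase =>
      if PySem.Str.isIn phrase t then
        String.ofList ((PySem.Chars.splitOn t.toList phrase.toList).headD [])
      else t) t).toList
    = (L.map String.toList).foldl pvStepA t.toList := by
  induction L with
  | nil => intro t; simp
  | cons p L ih =>
    intro t
    simp only [List.foldl_cons, List.map_cons]
    rw [ih]
    congr 1
    by_cases h : PySem.Str.isIn p t = true
    · have hb : PySem.Chars.isIn p.toList t.toList = true := by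
        simpa using h
      simp [pvStepA, hb]
    · have hb : ¬ PySem.Chars.isIn p.toList t.toList = true := by
        simpa using h
      simp [pvStepA, hb]

lemma pvOminFold (t : List Nat) : ∀ (a : Nat), t.foldl pvOmin (some a) = some (t.foldl min a) := by
  induction t with
  | nil => intro a; rfl
  | cons x t ih => intro a; simp only [List.foldl_cons, pvOmin]; exact ih _

lemma pvCastFold (t : List Nat) : ∀ (a : Nat),
    (t.map (fun n : Nat => (n : Int))).foldl min ((a : Nat) : Int) = ((t.foldl min a : Nat) : Int) := by
  induction t with
  | nil => intro a; rfl
  | cons x t ih =>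
    intro a
    rw [List.map_cons, List.foldl_cons, List.foldl_cons, ← Nat.cast_min]
    exact ih _

-- The pre-strip texts of A and B coincide.
lemma pvTrunc_eq (text : String) :
    pvPhrases.foldl (fun t phrase =>
      if PySem.Str.isIn phrase t then
        String.ofList ((PySem.Chars.splitOn t.toList phrase.toList).headD [])
      else t) text
    = (match PySem.List.min? ((pvPhrases.filter (fun p => PySem.Str.isIn p text)).map
        (fun p => PySem.Str.find text p)) (fun x => x) with
      | none => text
      | some m => PySem.Str.slice text none (some m)) := by
  have hA : (pvPhrases.foldl (fun t phrase =>
      if PySem.Str.isIn phrase t then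
        String.ofList ((PySem.Chars.splitOn t.toList phrase.toList).headD [])
      else t) text).toList = pvTrunc text.toList (pvFoldMin text.toList pvPL none) := by
    rw [pvFoldA_toList]
    exact pvFold_eq text.toList pvPL (fun p hp => hp) none trivial
  have hFM : pvFoldMin text.toList pvPL none
      = ((pvPL.filter (fun p => PySem.Chars.isIn p text.toList)).map
          (fun p => (PySem.Chars.find text.toList p).toNat)).foldl pvOmin none := by
    unfold pvFoldMin
    rw [PySem.List.foldl_if_eq_foldl_filter (p := fun p => PySem.Chars.isIn p text.toList)
        (f := fun acc p => pvOmin acc (PySem.Chars.find text.toList p).toNat)]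
    rw [List.foldl_map]
  have hfilter : pvPL.filter (fun p => PySem.Chars.isIn p text.toList)
      = (pvPhrases.filter (fun p => PySem.Str.isIn p text)).map String.toList := by
    unfold pvPL
    rw [List.filter_map]
    congr 1
  have hpos : (pvPhrases.filter (fun p => PySem.Str.isIn p text)).map
        (fun p => PySem.Str.find text p)
      = ((pvPL.filter (fun p => PySem.Chars.isIn p text.toList)).map
          (fun p => (PySem.Chars.find text.toList p).toNat)).map (fun n : Nat => (n : Int)) := by
    rw [hfilter, List.map_map, List.map_map]
    apply List.map_congr_left
    intro p hp
    have hin : PySem.Chars.isIn p.toList text.toList = true := by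
      have := List.of_mem_filter hp
      simpa using this
    have hnn : 0 ≤ PySem.Chars.find text.toList p.toList :=
      (PySem.Chars.find_nonneg_iff _ _).mpr ((PySem.Chars.isIn_iff_infix _ _).mp hin)
    simp only [Function.comp]
    rw [Int.toNat_of_nonneg hnn]
    simp
  set N := (pvPL.filter (fun p => PySem.Chars.isIn p text.toList)).map
      (fun p => (PySem.Chars.find text.toList p).toNat) with hN
  cases hNe : N with
  | nil =>
    rw [hpos, hNe]
    simp only [List.map_nil]
    have hmin : PySem.List.min? ([] : List Int) (fun x => x) = none := rfl
    rw [hmin]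
    apply String.toList_inj.mp
    rw [hA, hFM, hNe]
    rfl
  | cons a t =>
    rw [hpos, hNe]
    simp only [List.map_cons]
    rw [PySem.List.min?_id_cons, pvCastFold]
    apply String.toList_inj.mp
    rw [hA, hFM, hNe]
    simp only [List.foldl_cons, pvOmin, pvOminFold]
    have : (PySem.Str.slice text none (some ((t.foldl min a : Nat) : Int))).toList
        = List.take (t.foldl min a) text.toList := by
      simp only [PySem.Str.toList_slice, PySem.Chars.slice_eq_listSlice,
        PySem.List.slice_to_natCast]
    rw [this]
    simp [pvTrunc]

-- ===== VERDICT (by name: the statement is the Claim_ definition above) =====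
theorem clean_recipe_text_spec : Claim_equal_clean_recipe_text := by
  intro text _
  unfold Spec_clean_recipe_text clean_recipe_text clean_recipe_text_alt
  simp only []
  rw [pvTrunc_eq]
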